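-- pv_equiv track=rewrite | github.com/idea-fasoc/datasheet-scrubber | table_identification_final_2.py | get_coordinates_from_string
-- ===== SOURCE A (Python) =====
-- def get_coordinates_from_string(str):
--     min_vals = [10000, 10000]
--     max_vals = [0,0]
--
--     on_X = True
--     temp = ""
--     for char in str:
--         if(char == "," or char == " "):
--             if(int(temp) < min_vals[not on_X]):
--                 min_vals[not on_X] = int(temp)
--             if(int(temp) > max_vals[not on_X]):
--                 max_vals[not on_X] = int(temp)
--             on_X = not on_X
--             temp = ""
--         else:
--             temp += char
--
--     return min_vals, max_vals
-- ===== SOURCE B (Python) =====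
-- def get_coordinates_from_string(str):
--     tokens = str.replace(",", " ").split(" ")[:-1]
--     xs = [int(t) for t in tokens[0::2]]
--     ys = [int(t) for t in tokens[1::2]]
--     return [min(xs + [10000]), min(ys + [10000])], [max(xs + [0]), max(ys + [0])]
-- ===== Notes on version B (the rewrite author's own statement) =====
-- stated objective: simpler
-- what changed: Replaces the character-by-character state machine (running temp buffer, axis toggle, in-place min/max clamping) by token-level processing: normalise ',' to ' ', split, drop the trailing unterminated token, partition tokens by index parity into x/y lists, and take closed-form min/max with the original clamp sentinels appended.
import Mathlib
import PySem

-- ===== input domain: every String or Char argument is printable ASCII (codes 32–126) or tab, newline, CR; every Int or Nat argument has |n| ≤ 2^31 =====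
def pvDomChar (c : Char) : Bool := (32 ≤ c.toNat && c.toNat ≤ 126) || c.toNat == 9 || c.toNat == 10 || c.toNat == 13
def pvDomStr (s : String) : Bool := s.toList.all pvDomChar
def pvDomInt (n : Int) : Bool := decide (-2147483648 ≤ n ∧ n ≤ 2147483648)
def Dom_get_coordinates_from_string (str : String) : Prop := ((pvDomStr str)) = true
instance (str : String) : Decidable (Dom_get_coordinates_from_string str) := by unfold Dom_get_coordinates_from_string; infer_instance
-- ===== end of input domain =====

-- B replaces A's character-by-character state machine by token-level processing
-- (split on the delimiters, drop the unterminated last token, parity-partition,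
-- closed-form min/max with the clamp sentinels appended); objective: simpler.

-- ===== PORT A =====
-- the loop body of A's `for char in str` (temp kept as List Char; `temp += char` is `temp ++ [char]`)
def stepA (st : List Int × List Int × Bool × List Char) (char : Char) :
    List Int × List Int × Bool × List Char :=
  match st with
  | (min_vals, max_vals, on_X, temp) =>
    if char = ',' ∨ char = ' ' then
      -- int(temp); Pre_ excludes the inputs where Python's int() raises ValueError
      let v : Int := (PySem.Int.ofChars? temp).getD 0
      -- Python's `not on_X` used as a list index (True→0 is `not False`… i.e. index 0 iff on_X)
      let i : Nat := if on_X then 0 else 1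
      let min_vals' := if v < min_vals.getD i 0 then min_vals.set i v else min_vals
      let max_vals' := if v > max_vals.getD i 0 then max_vals.set i v else max_vals
      (min_vals', max_vals', !on_X, [])
    else
      (min_vals, max_vals, on_X, temp ++ [char])

def get_coordinates_from_string (str : String) : List Int × List Int :=
  match str.toList.foldl stepA ([10000, 10000], [0, 0], true, []) with
  | (min_vals, max_vals, _, _) => (min_vals, max_vals)

-- ===== PORT B =====
def get_coordinates_from_string_alt (str : String) : List Int × List Int :=
  -- tokens = str.replace(",", " ").split(" ")[:-1]   (sep ≠ "" so split? is never none)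
  let tokens0 := (PySem.Str.split? (PySem.Str.replace str "," " ") " ").getD []
  let tokens := PySem.List.slice tokens0 none (some (-1))
  -- xs = [int(t) for t in tokens[0::2]] ; ys = [int(t) for t in tokens[1::2]]
  let xs := ((PySem.List.slice? tokens (some 0) none 2).getD []).map
              (fun t => (PySem.Int.ofStr? t).getD 0)
  let ys := ((PySem.List.slice? tokens (some 1) none 2).getD []).map
              (fun t => (PySem.Int.ofStr? t).getD 0)
  ([(PySem.List.min? (xs ++ [10000]) (fun v => v)).getD 0,
    (PySem.List.min? (ys ++ [10000]) (fun v => v)).getD 0],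
   [(PySem.List.max? (xs ++ [0]) (fun v => v)).getD 0,
    (PySem.List.max? (ys ++ [0]) (fun v => v)).getD 0])

-- ===== PRECONDITION & SPEC =====
-- the segments of the string between the delimiters ',' and ' '
def splitDelim : List Char → List (List Char)
  | [] => [[]]
  | c :: rest =>
      if c = ',' ∨ c = ' ' then [] :: splitDelim rest
      else (splitDelim rest).modifyHead (c :: ·)

-- Pre_ excludes exactly the inputs where A raises ValueError: every delimiter-terminated
-- token (all segments but the trailing unterminated one) must parse as a Python int.
def Pre_get_coordinates_from_string (str : String) : Prop :=
  ∀ t ∈ (splitDelim str.toList).dropLast, (PySem.Int.ofChars? t).isSome = true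
instance (str : String) : Decidable (Pre_get_coordinates_from_string str) := by
  unfold Pre_get_coordinates_from_string; infer_instance

def pvWitness_get_coordinates_from_string : String := "12,-3 4,5 "

def Spec_get_coordinates_from_string (str : String) (out : List Int × List Int) : Prop :=
  out = get_coordinates_from_string_alt str
instance (str : String) (out : List Int × List Int) :
    Decidable (Spec_get_coordinates_from_string str out) := by
  unfold Spec_get_coordinates_from_string; infer_instance

-- ===== CLAIM (what is proved, stated in full; the proofs are below) =====
def Claim_equal_get_coordinates_from_string : Prop :=
  ∀ (str : String), Dom_get_coordinates_from_string str →
    Pre_get_coordinates_from_string str →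
      Spec_get_coordinates_from_string str (get_coordinates_from_string str)

-- ===== LEMMAS AND PROOFS =====

def repC (c : Char) : Char := if c = ',' then ' ' else c

def intOf (t : List Char) : Int := (PySem.Int.ofChars? t).getD 0

-- split on ' ' only (what str.split(" ") does after the replace)
def splitSp : List Char → List (List Char)
  | [] => [[]]
  | c :: rest => if c = ' ' then [] :: splitSp rest else (splitSp rest).modifyHead (c :: ·)

mutual
def evens {α : Type} : List α → List α
  | [] => []
  | a :: t => a :: odds t
def odds {α : Type} : List α → List α
  | [] => []
  | _ :: t => evens t
end

def procVals : (Int × Int × Int × Int × Bool) → List Int → (Int × Int × Int × Int × Bool)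
  | st, [] => st
  | (m0, m1, M0, M1, onX), v :: vs =>
      procVals (if onX then (min m0 v, m1, max M0 v, M1, false)
                else (m0, min m1 v, M0, max M1 v, true)) vs

def wrapSt (p : Int × Int × Int × Int × Bool) (tp : List Char) :
    List Int × List Int × Bool × List Char :=
  ([p.1, p.2.1], [p.2.2.1, p.2.2.2.1], p.2.2.2.2, tp)

lemma modifyHead_nil_append {α : Type} (l : List (List α)) :
    l.modifyHead (fun x => [] ++ x) = l := by cases l <;> simp

lemma modifyHead_id' {α : Type} (l : List α) :
    l.modifyHead (fun x => x) = l := by cases l <;> simp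

lemma modifyHead_congr {α : Type} (f g : α → α) (h : ∀ x, f x = g x) (l : List α) :
    l.modifyHead f = l.modifyHead g := by cases l <;> simp [h]

lemma replace_go_single (l acc : List Char) (fuel : Nat) (h : l.length ≤ fuel) :
    PySem.Chars.replace.go [','] [' '] fuel l acc = acc.reverse ++ l.map repC := by
  induction l generalizing acc fuel with
  | nil => cases fuel <;> simp [PySem.Chars.replace.go]
  | cons c t ih =>
      cases fuel with
      | zero => simp at h
      | succ f =>
          rw [PySem.Chars.replace.go]
          by_cases hc : c = ','
          · have hp : [','].isPrefixOf (c :: t) = true := by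
              show ((',' == c) && List.isPrefixOf [] t) = true
              simp [hc]
            rw [if_pos hp]
            have hd : List.drop [','].length (c :: t) = t := by simp
            rw [hd, ih ([' '].reverse ++ acc) f (by simpa using h)]
            simp [repC, hc]
          · have hb : (',' == c) = false := by
              rw [beq_eq_false_iff_ne]
              exact fun hh => hc hh.symm
            have hp : ([','].isPrefixOf (c :: t)) = false := by
              show ((',' == c) && List.isPrefixOf [] t) = false
              rw [hb]; simp
            rw [if_neg (by simp [hp])]
            rw [ih (c :: acc) f (by simpa using h)]
            simp [repC, hc]

lemma replace_comma (cs : List Char) :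
    PySem.Chars.replace cs [','] [' '] = cs.map repC := by
  unfold PySem.Chars.replace
  simp only [List.isEmpty_cons, if_false, Bool.false_eq_true]
  rw [replace_go_single cs [] cs.length (le_refl _)]
  simp

lemma splitOn_go_space (l cur : List Char) (accs : List (List Char)) (fuel : Nat)
    (h : l.length ≤ fuel) :
    PySem.Chars.splitOn.go [' '] fuel l cur accs
      = accs.reverse ++ (splitSp l).modifyHead (cur.reverse ++ ·) := by
  induction l generalizing cur accs fuel with
  | nil => cases fuel <;> simp [PySem.Chars.splitOn.go, splitSp]
  | cons c t ih =>
      cases fuel with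
      | zero => simp at h
      | succ f =>
          rw [PySem.Chars.splitOn.go]
          by_cases hc : c = ' '
          · have hp : [' '].isPrefixOf (c :: t) = true := by
              show ((' ' == c) && List.isPrefixOf [] t) = true
              simp [hc]
            rw [if_pos hp]
            have hd : List.drop [' '].length (c :: t) = t := by simp
            rw [hd, ih [] (cur.reverse :: accs) f (by simpa using h)]
            simp [splitSp, hc, modifyHead_id']
          · have hb : (' ' == c) = false := by
              rw [beq_eq_false_iff_ne]
              exact fun hh => hc hh.symm
            have hp : ([' '].isPrefixOf (c :: t)) = false := by
              show ((' ' == c) && List.isPrefixOf [] t) = false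
              rw [hb]; simp
            rw [if_neg (by simp [hp])]
            rw [ih (c :: cur) accs f (by simpa using h)]
            simp only [splitSp, hc, if_false, List.modifyHead_modifyHead]
            rw [modifyHead_congr ((fun x => cur.reverse ++ x) ∘ (fun x => c :: x))
                  (fun x => (c :: cur).reverse ++ x) (fun x => by simp) (splitSp t)]

lemma splitOn_space (cs : List Char) :
    PySem.Chars.splitOn cs [' '] = splitSp cs := by
  unfold PySem.Chars.splitOn
  rw [splitOn_go_space cs [] [] (cs.length + 1) (by omega)]
  simp [modifyHead_id']

lemma splitSp_map_repC (cs : List Char) : splitSp (cs.map repC) = splitDelim cs := by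
  induction cs with
  | nil => rfl
  | cons c t ih =>
      by_cases hc : c = ',' ∨ c = ' '
      · have hr : repC c = ' ' := by rcases hc with h | h <;> simp [repC, h]
        simp [splitSp, splitDelim, hr, hc, ih]
      · have h1 : repC c = c := by
          simp only [repC, ite_eq_right_iff]; intro h; exact absurd (Or.inl h) hc
        have h2 : ¬ c = ' ' := fun h => hc (Or.inr h)
        have h3 : ¬ c = ',' := fun h => hc (Or.inl h)
        simp [splitSp, splitDelim, h1, h2, h3, ih]

lemma splitDelim_ne_nil (cs : List Char) : splitDelim cs ≠ [] := by
  induction cs with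
  | nil => simp [splitDelim]
  | cons c t ih =>
      simp only [splitDelim]
      split
      · simp
      · intro h
        apply ih
        cases hsd : splitDelim t with
        | nil => rfl
        | cons a l => rw [hsd] at h; simp at h

lemma getLastD_cons' {α : Type} (a d : α) (l : List α) :
    (a :: l).getLastD d = l.getLastD a := by
  cases l <;> rfl

lemma getLastD_of_ne_nil {α : Type} (l : List α) (a b : α) (h : l ≠ []) :
    l.getLastD a = l.getLastD b := by
  cases l with
  | nil => exact absurd rfl h
  | cons x t => rw [getLastD_cons', getLastD_cons']

lemma foldA_eq (cs : List Char) (m0 m1 M0 M1 : Int) (onX : Bool) (temp : List Char) :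
    List.foldl stepA ([m0, m1], [M0, M1], onX, temp) cs
      = wrapSt (procVals (m0, m1, M0, M1, onX)
                  (((splitDelim cs).modifyHead (temp ++ ·)).dropLast.map intOf))
               (((splitDelim cs).modifyHead (temp ++ ·)).getLastD []) := by
  induction cs generalizing m0 m1 M0 M1 onX temp with
  | nil => simp [splitDelim, wrapSt, procVals]
  | cons c t ih =>
      by_cases hc : c = ',' ∨ c = ' '
      · have hne := splitDelim_ne_nil t
        have hstep : stepA ([m0, m1], [M0, M1], onX, temp) c
            = (if onX then ([min m0 (intOf temp), m1], [max M0 (intOf temp), M1], false, ([] : List Char))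
               else ([m0, min m1 (intOf temp)], [M0, max M1 (intOf temp)], true, [])) := by
          cases onX <;> simp [stepA, hc, intOf]
          all_goals constructor
          all_goals split_ifs
          all_goals try simp
          all_goals omega
        have hsplit : splitDelim (c :: t) = [] :: splitDelim t := by simp [splitDelim, hc]
        rw [List.foldl_cons, hstep, hsplit]
        cases honX : onX
        · rw [if_neg (by simp)]
          rw [ih]
          simp only [List.modifyHead_cons, List.append_nil, modifyHead_nil_append]
          rw [List.dropLast_cons_of_ne_nil hne, List.map_cons, getLastD_cons']
          rw [getLastD_of_ne_nil (splitDelim t) temp [] hne]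
          conv_rhs => rw [procVals]
          rw [if_neg (by simp)]
        · rw [if_pos rfl]
          rw [ih]
          simp only [List.modifyHead_cons, List.append_nil, modifyHead_nil_append]
          rw [List.dropLast_cons_of_ne_nil hne, List.map_cons, getLastD_cons']
          rw [getLastD_of_ne_nil (splitDelim t) temp [] hne]
          conv_rhs => rw [procVals]
          rw [if_pos rfl]
      · have hstep : stepA ([m0, m1], [M0, M1], onX, temp) c
            = ([m0, m1], [M0, M1], onX, temp ++ [c]) := by simp [stepA, hc]
        have hsplit : splitDelim (c :: t) = (splitDelim t).modifyHead (c :: ·) := by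
          simp [splitDelim, hc]
        rw [List.foldl_cons, hstep, ih, hsplit, List.modifyHead_modifyHead]
        rw [modifyHead_congr ((fun x => temp ++ x) ∘ (fun x => c :: x))
              (fun x => (temp ++ [c]) ++ x) (fun x => by simp) (splitDelim t)]

-- closed form of the alternating token loop
def endBool (b : Bool) (n : Nat) : Bool := if n % 2 = 0 then b else !b

lemma endBool_succ (b : Bool) (n : Nat) : endBool b (n + 1) = endBool (!b) n := by
  unfold endBool
  rcases Nat.mod_two_eq_zero_or_one n with h | h
  · have h2 : (n + 1) % 2 = 1 := by omega
    simp [h, h2]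
  · have h2 : (n + 1) % 2 = 0 := by omega
    simp [h, h2]

lemma procVals_closed (vs : List Int) :
    ∀ m0 m1 M0 M1 : Int,
      (procVals (m0, m1, M0, M1, true) vs
        = (List.foldl min m0 (evens vs), List.foldl min m1 (odds vs),
           List.foldl max M0 (evens vs), List.foldl max M1 (odds vs), endBool true vs.length))
    ∧ (procVals (m0, m1, M0, M1, false) vs
        = (List.foldl min m0 (odds vs), List.foldl min m1 (evens vs),
           List.foldl max M0 (odds vs), List.foldl max M1 (evens vs), endBool false vs.length)) := by
  induction vs with
  | nil => intro m0 m1 M0 M1; simp [procVals, evens, odds, endBool]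
  | cons v t ih =>
      intro m0 m1 M0 M1
      constructor
      · have h1 : procVals (m0, m1, M0, M1, true) (v :: t)
            = procVals (min m0 v, m1, max M0 v, M1, false) t := by simp [procVals]
        rw [h1, (ih (min m0 v) m1 (max M0 v) M1).2]
        simp only [evens, odds, List.foldl_cons, List.length_cons, endBool_succ, Bool.not_true]
      · have h1 : procVals (m0, m1, M0, M1, false) (v :: t)
            = procVals (m0, min m1 v, M0, max M1 v, true) t := by simp [procVals]
        rw [h1, (ih m0 (min m1 v) M0 (max M1 v)).1]
        simp only [evens, odds, List.foldl_cons, List.length_cons, endBool_succ, Bool.not_false]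

lemma evens_odds_map {α β : Type} (f : α → β) :
    ∀ l : List α, evens (l.map f) = (evens l).map f ∧ odds (l.map f) = (odds l).map f := by
  intro l
  induction l with
  | nil => simp [evens, odds]
  | cons a t ih => simp [evens, odds, ih.1, ih.2]

lemma filterMap_parity {α : Type} :
    ∀ xs : List α,
      (List.filterMap (fun k => xs[2 * k]?) (List.range ((xs.length + 1) / 2)) = evens xs)
    ∧ (List.filterMap (fun k => xs[1 + 2 * k]?) (List.range (xs.length / 2)) = odds xs) := by
  intro xs
  induction xs with
  | nil => simp [evens, odds]
  | cons a t ih =>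
      constructor
      · have hn : (t.length + 1 + 1) / 2 = t.length / 2 + 1 := by omega
        simp only [List.length_cons, hn, List.range_succ_eq_map]
        rw [List.filterMap_cons]
        simp only [Nat.mul_zero, List.getElem?_cons_zero]
        rw [List.filterMap_map]
        have he : (fun k => (a :: t)[2 * (Nat.succ k)]?) = (fun k => t[1 + 2 * k]?) := by
          funext k
          have h2 : 2 * Nat.succ k = (1 + 2 * k) + 1 := by omega
          rw [h2, List.getElem?_cons_succ]
        simp only [Function.comp_def, he]
        rw [ih.2]
        rfl
      · simp only [List.length_cons]
        have he : (fun k => (a :: t)[1 + 2 * k]?) = (fun k => t[2 * k]?) := by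
          funext k
          have h2 : 1 + 2 * k = (2 * k) + 1 := by omega
          rw [h2, List.getElem?_cons_succ]
        rw [he, ih.1]
        rfl

lemma map_dropLast' {α β : Type} (f : α → β) (l : List α) :
    (l.map f).dropLast = l.dropLast.map f := by
  simp

lemma slice?_zero_two {α : Type} (xs : List α) :
    PySem.List.slice? xs (some 0) none 2 = some (evens xs) := by
  simp only [PySem.List.slice?, PySem.List.sliceIndices]
  norm_num
  have hcnt : (if 0 < xs.length then (((xs.length : Int) + 2 - 1) / 2).toNat else 0)
      = (xs.length + 1) / 2 := by
    split_ifs with h <;> omega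
  have hf : ∀ k : Nat, ((2 * (k : Int)).toNat) = 2 * k := by intro k; omega
  rw [hcnt]
  simp only [hf]
  exact (filterMap_parity xs).1

lemma slice?_one_two {α : Type} (xs : List α) :
    PySem.List.slice? xs (some 1) none 2 = some (odds xs) := by
  cases xs with
  | nil => simp [PySem.List.slice?, PySem.List.sliceIndices, odds]
  | cons a t =>
      simp only [PySem.List.slice?, PySem.List.sliceIndices]
      norm_num
      have hcnt : (if 0 < t.length then (((t.length : Int) + 2 - 1) / 2).toNat else 0)
          = (t.length + 1) / 2 := by split_ifs with h <;> omega
      rw [hcnt]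
      have hf : ∀ k : Nat, (a :: t)[((1 : Int) + 2 * (k : Int)).toNat]? = t[2 * k]? := by
        intro k
        have h2 : ((1 : Int) + 2 * (k : Int)).toNat = 2 * k + 1 := by omega
        rw [h2, List.getElem?_cons_succ]
      simp only [hf]
      show _ = evens t
      exact (filterMap_parity t).1

lemma min_foldl_swap (t : List Int) : ∀ a b : Int,
    min (List.foldl min a t) b = List.foldl min (min a b) t := by
  induction t with
  | nil => intro a b; rfl
  | cons c t ih =>
      intro a b
      simp only [List.foldl_cons]
      rw [ih (min a c) b, min_right_comm]

lemma max_foldl_swap (t : List Int) : ∀ a b : Int,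
    max (List.foldl max a t) b = List.foldl max (max a b) t := by
  induction t with
  | nil => intro a b; rfl
  | cons c t ih =>
      intro a b
      simp only [List.foldl_cons]
      rw [ih (max a c) b, max_right_comm]

lemma min_append_sentinel (xs : List Int) (b : Int) :
    (PySem.List.min? (xs ++ [b]) (fun v => v)).getD 0 = List.foldl min b xs := by
  cases xs with
  | nil => simp [PySem.List.min?]
  | cons x t =>
      rw [List.cons_append, PySem.List.min?_id_cons]
      simp only [Option.getD_some, List.foldl_append, List.foldl_cons, List.foldl_nil]
      rw [min_foldl_swap, min_comm x b]

lemma max_append_sentinel (xs : List Int) (b : Int) :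
    (PySem.List.max? (xs ++ [b]) (fun v => v)).getD 0 = List.foldl max b xs := by
  cases xs with
  | nil => simp [PySem.List.max?]
  | cons x t =>
      rw [List.cons_append, PySem.List.max?_id_cons]
      simp only [Option.getD_some, List.foldl_append, List.foldl_cons, List.foldl_nil]
      rw [max_foldl_swap, max_comm x b]

lemma alt_closed (str : String) :
    get_coordinates_from_string_alt str
      = ([List.foldl min 10000 (evens (((splitDelim str.toList).dropLast).map intOf)),
          List.foldl min 10000 (odds (((splitDelim str.toList).dropLast).map intOf))],
         [List.foldl max 0 (evens (((splitDelim str.toList).dropLast).map intOf)),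
          List.foldl max 0 (odds (((splitDelim str.toList).dropLast).map intOf))]) := by
  unfold get_coordinates_from_string_alt
  have hrep : (PySem.Str.replace str "," " ").toList = str.toList.map repC := by
    rw [PySem.Str.toList_replace]
    have h1 : ("," : String).toList = [','] := rfl
    have h2 : (" " : String).toList = [' '] := rfl
    rw [h1, h2, replace_comma]
  have h1 : PySem.Str.split? (PySem.Str.replace str "," " ") " "
      = some (((splitDelim str.toList).map String.ofList)) := by
    unfold PySem.Str.split? PySem.Chars.split?
    have hsep : (" " : String).toList = [' '] := rfl
    rw [hsep, hrep]
    simp only [List.isEmpty_cons, if_false, Bool.false_eq_true]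
    rw [splitOn_space, splitSp_map_repC]
    rfl
  rw [h1]
  simp only [Option.getD_some]
  rw [PySem.List.slice_to_neg_one, map_dropLast' String.ofList]
  rw [slice?_zero_two, slice?_one_two]
  simp only [Option.getD_some]
  rw [(evens_odds_map String.ofList ((splitDelim str.toList).dropLast)).1,
      (evens_odds_map String.ofList ((splitDelim str.toList).dropLast)).2,
      List.map_map, List.map_map]
  have hcomp : ((fun t => (PySem.Int.ofStr? t).getD 0) ∘ String.ofList) = intOf := by
    funext t
    simp [PySem.Int.ofStr?, intOf]
  rw [hcomp]
  rw [min_append_sentinel, min_append_sentinel, max_append_sentinel, max_append_sentinel]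
  rw [(evens_odds_map intOf ((splitDelim str.toList).dropLast)).1,
      (evens_odds_map intOf ((splitDelim str.toList).dropLast)).2]

-- ===== VERDICT (by name: the statement is the Claim_ definition above) =====
theorem get_coordinates_from_string_spec : Claim_equal_get_coordinates_from_string := by
  intro str _ _
  unfold Spec_get_coordinates_from_string get_coordinates_from_string
  rw [foldA_eq str.toList 10000 10000 0 0 true [], alt_closed]
  simp only [modifyHead_nil_append]
  rw [(procVals_closed (((splitDelim str.toList).dropLast).map intOf) 10000 10000 0 0).1]
  rfl
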